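-- pv_equiv track=rewrite | github.com/qwe12345678asd/MTACP | group_greedy.py | get_available_task
-- ===== SOURCE A (Python) =====
-- def get_order_in_related_tasks(dependency_graph, task):
--     visited = set()
--     dependent_tasks = []
--
--     def dfs(current_task):
--         visited.add(current_task)
--         dependent_tasks.append(current_task)  # 将当前任务添加到结果列表
--         for dependent_task in dependency_graph.get(current_task, []):
--             if dependent_task not in visited:
--                 dfs(dependent_task)
--
--     dfs(task)
--     dependent_tasks.reverse()  # 反转结果列表
--     return dependent_tasks
--
-- def get_available_task(task_dict, arrived_tasks, best_assign,current_time, TC, delete_to_assign_task):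
--     """
--     计算当前可参与的任务
--     """
--     free_task = []
--     for i in arrived_tasks:
--         related_tasks = get_order_in_related_tasks(TC, i)
--         is_free = True
--         # for depend_id in task_dict[i]['Dt']:
--         #     if best_assign[depend_id]['assigned'] is False:
--         #         is_free = False
--         #         break
--         for related_tasks_conflict in related_tasks:
--             for id in task_dict[related_tasks_conflict]['Ct']:
--                 if best_assign[id]['assigned'] is True:
--                     is_free = False
--                     break
--         # for related_tasks_id in related_tasks:
--         #     for id in task_dict[related_tasks_conflict]['Ct']:
--         # if related_tasks.intersection(delete_to_assign_task) is True:
--         #     is_free = False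
--         # if len(related_tasks)>10:
--         #     is_free = False
--         if is_free:
--             free_task.append(i)
--     return free_task
-- ===== SOURCE B (Python) =====
-- def get_available_task(task_dict, arrived_tasks, best_assign, current_time, TC, delete_to_assign_task):
--     """
--     Compute the currently available tasks: an arrived task is free when no task in
--     its TC-related group has an already-assigned conflicting task.
--     """
--     free_task = []
--     for i in arrived_tasks:
--         visited = {i}
--         order = []
--         stack = [i]
--         while stack:
--             t = stack.pop()
--             order.append(t)
--             for n in TC.get(t, []):
--                 if n not in visited:
--                     visited.add(n)
--                     stack.append(n)
--         if not any(best_assign[c]['assigned'] is True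
--                    for t in order for c in task_dict[t]['Ct']):
--             free_task.append(i)
--     return free_task
-- ===== Notes on version B (the rewrite author's own statement) =====
-- stated objective: alternative
-- what changed: The recursive DFS that builds an ordered, reversed visit list is replaced by an iterative stack-based traversal maintaining only the visited set, and the nested conflict loops with an is_free flag by a single short-circuiting any(); the visit order is dropped entirely since only set membership matters. Pre_ excludes exactly the inputs where A raises KeyError (a task reachable via TC missing its task_dict['Ct'] entry, or a conflict id it dereferences missing from best_assign).
import Mathlib
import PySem

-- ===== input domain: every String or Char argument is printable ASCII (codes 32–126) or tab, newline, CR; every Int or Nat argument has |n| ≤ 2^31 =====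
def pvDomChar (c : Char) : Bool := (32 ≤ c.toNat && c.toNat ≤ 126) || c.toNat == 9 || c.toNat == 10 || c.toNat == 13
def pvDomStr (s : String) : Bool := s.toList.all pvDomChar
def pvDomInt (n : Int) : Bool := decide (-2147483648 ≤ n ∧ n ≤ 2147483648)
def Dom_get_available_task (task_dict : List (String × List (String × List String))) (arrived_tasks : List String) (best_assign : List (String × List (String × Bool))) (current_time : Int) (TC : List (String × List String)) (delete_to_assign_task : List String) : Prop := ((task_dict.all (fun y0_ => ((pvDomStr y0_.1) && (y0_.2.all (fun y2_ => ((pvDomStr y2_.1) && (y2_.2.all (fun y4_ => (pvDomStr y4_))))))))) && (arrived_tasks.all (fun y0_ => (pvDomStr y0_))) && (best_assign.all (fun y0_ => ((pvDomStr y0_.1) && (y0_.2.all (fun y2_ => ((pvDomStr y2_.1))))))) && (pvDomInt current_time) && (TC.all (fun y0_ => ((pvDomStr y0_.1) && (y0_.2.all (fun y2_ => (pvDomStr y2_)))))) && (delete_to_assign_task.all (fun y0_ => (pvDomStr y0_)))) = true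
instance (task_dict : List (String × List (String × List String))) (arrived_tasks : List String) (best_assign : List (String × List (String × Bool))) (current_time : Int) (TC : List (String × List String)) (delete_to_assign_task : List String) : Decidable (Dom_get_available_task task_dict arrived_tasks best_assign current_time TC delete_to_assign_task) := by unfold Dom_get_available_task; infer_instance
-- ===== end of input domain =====

-- B replaces A's recursive DFS (ordered, reversed visit list) by an iterative stack-based
-- traversal of the visited set, and the nested conflict loops by a single any() test
-- (alternative decomposition; the visit order is dropped since only membership matters).

-- ===== PORT A =====
-- shared lookup helpers (both Pythons do the same dict lookups):
-- TC.get(t, [])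
def nb (TC : List (String × List String)) (t : String) : List String :=
  PySem.Dict.getD (PySem.Dict.mk TC) t []
-- task_dict[r]['Ct']; none = KeyError
def ctLookup (task_dict : List (String × List (String × List String))) (r : String) : Option (List String) :=
  (PySem.Dict.get? (PySem.Dict.mk task_dict) r).bind (fun d => PySem.Dict.get? (PySem.Dict.mk d) "Ct")
-- total stand-in for task_dict[r]['Ct']: exact under Pre_ (the default [] is never hit there)
def ctOf (task_dict : List (String × List (String × List String))) (r : String) : List String :=
  (ctLookup task_dict r).getD []
-- best_assign[c]['assigned']; none = KeyError
def asgLookup (best_assign : List (String × List (String × Bool))) (c : String) : Option Bool :=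
  (PySem.Dict.get? (PySem.Dict.mk best_assign) c).bind (fun d => PySem.Dict.get? (PySem.Dict.mk d) "assigned")
-- total stand-in for best_assign[c]['assigned'] is True: exact under Pre_
def asg (best_assign : List (String × List (String × Bool))) (c : String) : Bool :=
  (asgLookup best_assign c).getD false

-- the nested 'def dfs' of get_order_in_related_tasks; Python's unbounded recursion is
-- ported with a fuel argument (the fuel used below is proved sufficient in the lemmas)
def dfsA (TC : List (String × List String)) :
    Nat → PySem.Set String → List String → String → PySem.Set String × List String
  | 0, vis, acc, _ => (vis, acc)
  | Nat.succ f, vis, acc, t =>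
      (nb TC t).foldl
        (fun st n => if n ∈ st.1 then st else dfsA TC f st.1 st.2 n)
        (PySem.Set.add vis t, acc ++ [t])

def get_order_in_related_tasks (TC : List (String × List String)) (task : String) : List String :=
  ((dfsA TC ((TC.flatMap (fun kv => kv.2)).length + 2) PySem.Set.empty [] task).2).reverse

-- 'for id in ...Ct: if ... is True: is_free = False; break'
def ctBreakLoop (best_assign : List (String × List (String × Bool))) :
    List String → Bool → Bool
  | [], f => f
  | c :: rest, f => if asg best_assign c then false else ctBreakLoop best_assign rest f

def get_available_task (task_dict : List (String × List (String × List String))) (arrived_tasks : List String) (best_assign : List (String × List (String × Bool))) (current_time : Int) (TC : List (String × List String)) (delete_to_assign_task : List String) : List String :=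
  arrived_tasks.foldl (fun free_task i =>
    let related_tasks := get_order_in_related_tasks TC i
    let is_free := related_tasks.foldl
      (fun f r => ctBreakLoop best_assign (ctOf task_dict r) f) true
    if is_free then free_task ++ [i] else free_task) []

-- ===== PORT B =====
-- the 'while stack:' loop of Source B.  The stack is a head-first list: a Python
-- 'stack.pop()' from the end followed by appends is cons/uncons at the head here
-- (same elements, same LIFO order).  The while loop is ported with a fuel argument;
-- fuel |all TC edge targets| + 2 bounds its iteration count (proved in the lemmas:
-- each iteration pops one entry and every task is pushed at most once).
-- loop body: 'if n not in visited: visited.add(n); stack.append(n)'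
def gB : PySem.Set String × List String → String → PySem.Set String × List String :=
  fun p n => if n ∈ p.1 then p else (PySem.Set.add p.1 n, n :: p.2)

def dfsB (TC : List (String × List String)) :
    Nat → PySem.Set String → List String → List String → PySem.Set String × List String
  | 0, vis, acc, _ => (vis, acc)
  | Nat.succ _, vis, acc, [] => (vis, acc)
  | Nat.succ f, vis, acc, t :: rest =>
      let p := (nb TC t).foldl gB (vis, rest)
      dfsB TC f p.1 (acc ++ [t]) p.2

-- visited = {i}; order = []; stack = [i]; while stack: …  (returns (visited, order))
def bTrav (TC : List (String × List String)) (i : String) : PySem.Set String × List String :=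
  dfsB TC ((TC.flatMap (fun kv => kv.2)).length + 2) (PySem.Set.ofList [i]) [] [i]

def get_available_task_alt (task_dict : List (String × List (String × List String))) (arrived_tasks : List String) (best_assign : List (String × List (String × Bool))) (current_time : Int) (TC : List (String × List String)) (delete_to_assign_task : List String) : List String :=
  arrived_tasks.foldl (fun free_task i =>
    let order := (bTrav TC i).2
    if order.any (fun t => (ctOf task_dict t).any (fun c => asg best_assign c))
    then free_task else free_task ++ [i]) []

-- ===== PRECONDITION & SPEC =====
-- pyClosure TC i: the set of tasks reachable from i along TC edges (a property of the
-- input graph, computed by saturation; used only to state Pre_).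
def pyClosureStep (TC : List (String × List String)) (s : PySem.Set String) : PySem.Set String :=
  PySem.Set.update s (s.flatMap (fun t => nb TC t))
def pyClosure (TC : List (String × List String)) (i : String) : PySem.Set String :=
  (List.range ((TC.flatMap (fun kv => kv.2)).length + 1)).foldl
    (fun s _ => pyClosureStep TC s) (PySem.Set.ofList [i])
-- Python's `for id in cs: if best_assign[id]['assigned'] is True: break` returns without a
-- KeyError iff every lookup up to (and including) the first assigned id succeeds:
def okCt (best_assign : List (String × List (String × Bool))) : List String → Bool
  | [] => true
  | c :: rest =>
      match asgLookup best_assign c with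
      | none => false
      | some b => if b then true else okCt best_assign rest
-- Pre_ excludes exactly the inputs on which Python A raises KeyError: some task reachable
-- from an arrived task via TC lacks a task_dict entry with 'Ct', or a conflict id that the
-- loop dereferences (one before or at the first assigned id) lacks a best_assign entry
-- with 'assigned'.  A returns normally on every other input.
def Pre_get_available_task (task_dict : List (String × List (String × List String))) (arrived_tasks : List String) (best_assign : List (String × List (String × Bool))) (current_time : Int) (TC : List (String × List String)) (delete_to_assign_task : List String) : Prop :=
  ∀ i ∈ arrived_tasks, ∀ r ∈ pyClosure TC i,
    (ctLookup task_dict r).isSome = true ∧ okCt best_assign (ctOf task_dict r) = true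
instance (task_dict : List (String × List (String × List String))) (arrived_tasks : List String) (best_assign : List (String × List (String × Bool))) (current_time : Int) (TC : List (String × List String)) (delete_to_assign_task : List String) : Decidable (Pre_get_available_task task_dict arrived_tasks best_assign current_time TC delete_to_assign_task) := by unfold Pre_get_available_task; infer_instance

def pvWitness_get_available_task : (List (String × List (String × List String))) × List String × (List (String × List (String × Bool))) × Int × (List (String × List String)) × List String :=
  ([("a", [("Ct", ["b"])])], ["a"], [("b", [("assigned", true)])], 0, [], [])

def Spec_get_available_task (task_dict : List (String × List (String × List String))) (arrived_tasks : List String) (best_assign : List (String × List (String × Bool))) (current_time : Int) (TC : List (String × List String)) (delete_to_assign_task : List String) (out : List String) : Prop := out = get_available_task_alt task_dict arrived_tasks best_assign current_time TC delete_to_assign_task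
instance (task_dict : List (String × List (String × List String))) (arrived_tasks : List String) (best_assign : List (String × List (String × Bool))) (current_time : Int) (TC : List (String × List String)) (delete_to_assign_task : List String) (out : List String) : Decidable (Spec_get_available_task task_dict arrived_tasks best_assign current_time TC delete_to_assign_task out) := by unfold Spec_get_available_task; infer_instance

-- ===== CLAIM (what is proved, stated in full; the proofs are below) =====
def Claim_equal_get_available_task : Prop := ∀ (task_dict : List (String × List (String × List String))) (arrived_tasks : List String) (best_assign : List (String × List (String × Bool))) (current_time : Int) (TC : List (String × List String)) (delete_to_assign_task : List String), Dom_get_available_task task_dict arrived_tasks best_assign current_time TC delete_to_assign_task → Pre_get_available_task task_dict arrived_tasks best_assign current_time TC delete_to_assign_task → Spec_get_available_task task_dict arrived_tasks best_assign current_time TC delete_to_assign_task (get_available_task task_dict arrived_tasks best_assign current_time TC delete_to_assign_task)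

-- ===== LEMMAS AND PROOFS =====

theorem pvWitness_ok :
    Dom_get_available_task (pvWitness_get_available_task.1) (pvWitness_get_available_task.2.1) (pvWitness_get_available_task.2.2.1) (pvWitness_get_available_task.2.2.2.1) (pvWitness_get_available_task.2.2.2.2.1) (pvWitness_get_available_task.2.2.2.2.2) ∧
    Pre_get_available_task (pvWitness_get_available_task.1) (pvWitness_get_available_task.2.1) (pvWitness_get_available_task.2.2.1) (pvWitness_get_available_task.2.2.2.1) (pvWitness_get_available_task.2.2.2.2.1) (pvWitness_get_available_task.2.2.2.2.2) := by
  constructor <;> decide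

-- the body of A's neighbour fold, named so the lemmas can speak about it
def gA (TC : List (String × List String)) (f : Nat) :
    PySem.Set String × List String → String → PySem.Set String × List String :=
  fun st n => if n ∈ st.1 then st else dfsA TC f st.1 st.2 n

-- a set closed under TC-neighbours
def ClosedUnder (TC : List (String × List String)) (S : List String) : Prop :=
  ∀ t ∈ S, ∀ n ∈ nb TC t, n ∈ S

-- every member of R that is new w.r.t. V has all its neighbours in R
def ClosedNew (TC : List (String × List String)) (R V : List String) : Prop :=
  ∀ x ∈ R, x ∉ V → ∀ n ∈ nb TC x, n ∈ R

-- number of candidates not yet visited (the fuel measure)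
def cnt (C : List String) (s : List String) : Nat :=
  List.countP (fun x => decide (x ∉ s)) C

theorem nb_subset (TC : List (String × List String)) (t : String) :
    ∀ n ∈ nb TC t, n ∈ TC.flatMap (fun kv => kv.2) := by
  induction TC with
  | nil =>
    intro n hn
    simp [nb, PySem.Dict.getD_eq_get?_getD, PySem.Dict.get?] at hn
  | cons kv rest ih =>
    intro n hn
    rw [nb, PySem.Dict.getD_eq_get?_getD] at hn
    rcases kv with ⟨k, vs⟩
    rw [PySem.Dict.get?_mk_cons] at hn
    by_cases hk : (k == t) = true
    · rw [if_pos hk] at hn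
      simp only [Option.getD_some] at hn
      simp only [List.flatMap_cons]
      exact List.mem_append.mpr (Or.inl hn)
    · rw [if_neg hk] at hn
      simp only [List.flatMap_cons]
      refine List.mem_append.mpr (Or.inr ?_)
      exact ih n (by rw [nb, PySem.Dict.getD_eq_get?_getD]; exact hn)

theorem cnt_mono (C : List String) (s s' : List String) (h : ∀ x ∈ s, x ∈ s') :
    cnt C s' ≤ cnt C s := by
  unfold cnt
  refine List.countP_mono_left ?_
  intro x _ hpx
  simp only [decide_eq_true_eq] at hpx ⊢
  exact fun hxs => hpx (h x hxs)

theorem cnt_strict (C : List String) (s s' : List String) (t : String)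
    (htC : t ∈ C) (hts : t ∉ s) (h : ∀ x ∈ s, x ∈ s') (hts' : t ∈ s') :
    cnt C s' < cnt C s := by
  induction C with
  | nil => cases htC
  | cons a C ih =>
    have hle : cnt C s' ≤ cnt C s := cnt_mono C s s' h
    unfold cnt at hle ⊢
    rcases List.mem_cons.mp htC with rfl | haC
    · simp only [List.countP_cons]
      have e1 : decide (t ∉ s') = false := by simp [hts']
      have e2 : decide (t ∉ s) = true := by simp [hts]
      simp only [e1, e2]
      simp only [Bool.false_eq_true, if_false, if_true]
      omega
    · have hlt := ih haC
      unfold cnt at hlt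
      simp only [List.countP_cons]
      by_cases h1 : a ∈ s'
      · have e1 : decide (a ∉ s') = false := by simp [h1]
        simp only [e1, Bool.false_eq_true, if_false]
        by_cases h2 : a ∈ s
        · have e2 : decide (a ∉ s) = false := by simp [h2]
          simp only [e2, Bool.false_eq_true, if_false]
          omega
        · have e2 : decide (a ∉ s) = true := by simp [h2]
          simp only [e2, if_true]
          omega
      · have h2 : a ∉ s := fun hs => h1 (h a hs)
        have e1 : decide (a ∉ s') = true := by simp [h1]
        have e2 : decide (a ∉ s) = true := by simp [h2]
        simp only [e1, e2, if_true]
        omega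

-- ===== A-side: dfsA computes (exactly) the least TC-closed set containing the root =====

theorem dfsA_mono (TC : List (String × List String)) :
    ∀ (f : Nat) (vis : PySem.Set String) (acc : List String) (t : String),
      ∀ x ∈ vis, x ∈ (dfsA TC f vis acc t).1 := by
  intro f
  induction f with
  | zero => intro vis acc t x hx; simpa [dfsA] using hx
  | succ f ih =>
    intro vis acc t x hx
    simp only [dfsA]
    refine List.foldlRecOn (motive := fun (st : PySem.Set String × List String) => x ∈ st.1)
      (nb TC t) (fun st n => if n ∈ st.1 then st else dfsA TC f st.1 st.2 n) ?_ ?_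
    · exact (PySem.Set.mem_add vis t x).mpr (Or.inl hx)
    · intro st hst n _
      by_cases h : n ∈ st.1
      · simpa [h] using hst
      · simpa [h] using ih st.1 st.2 n x hst

theorem dfsA_mem_self (TC : List (String × List String)) (f : Nat) (vis : PySem.Set String)
    (acc : List String) (t : String) (hf : 0 < f) : t ∈ (dfsA TC f vis acc t).1 := by
  cases f with
  | zero => exact absurd hf (by simp)
  | succ f =>
    simp only [dfsA]
    refine List.foldlRecOn (motive := fun (st : PySem.Set String × List String) => t ∈ st.1)
      (nb TC t) (fun st n => if n ∈ st.1 then st else dfsA TC f st.1 st.2 n) ?_ ?_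
    · exact (PySem.Set.mem_add vis t t).mpr (Or.inr rfl)
    · intro st hst n _
      by_cases h : n ∈ st.1
      · simpa [h] using hst
      · simpa [h] using dfsA_mono TC f st.1 st.2 n t hst

theorem dfsA_sync (TC : List (String × List String)) :
    ∀ (f : Nat) (vis : PySem.Set String) (acc : List String) (t : String),
      (∀ x, x ∈ acc ↔ x ∈ vis) →
      ∀ x, x ∈ (dfsA TC f vis acc t).2 ↔ x ∈ (dfsA TC f vis acc t).1 := by
  intro f
  induction f with
  | zero => intro vis acc t h x; simpa [dfsA] using h x
  | succ f ih =>
    intro vis acc t h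
    simp only [dfsA]
    refine List.foldlRecOn
      (motive := fun (st : PySem.Set String × List String) => ∀ y, y ∈ st.2 ↔ y ∈ st.1)
      (nb TC t) (fun st n => if n ∈ st.1 then st else dfsA TC f st.1 st.2 n) ?_ ?_
    · intro y
      simp only [List.mem_append, PySem.Set.mem_add, List.mem_singleton, h y]
    · intro st hst n _
      by_cases hmem : n ∈ st.1
      · simpa [hmem] using hst
      · intro y
        simpa [hmem] using ih st.1 st.2 n hst y

theorem dfsA_subset_closed (TC : List (String × List String)) :
    ∀ (f : Nat) (vis : PySem.Set String) (acc : List String) (t : String) (S : List String),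
      ClosedUnder TC S → (∀ x ∈ vis, x ∈ S) → t ∈ S →
      ∀ x ∈ (dfsA TC f vis acc t).1, x ∈ S := by
  intro f
  induction f with
  | zero => intro vis acc t S _ hvis _ x hx; exact hvis x (by simpa [dfsA] using hx)
  | succ f ih =>
    intro vis acc t S hS hvis ht
    simp only [dfsA]
    refine List.foldlRecOn
      (motive := fun (st : PySem.Set String × List String) => ∀ y ∈ st.1, y ∈ S)
      (nb TC t) (fun st n => if n ∈ st.1 then st else dfsA TC f st.1 st.2 n) ?_ ?_
    · intro y hy
      rcases (PySem.Set.mem_add vis t y).mp hy with h | h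
      · exact hvis y h
      · exact h ▸ ht
    · intro st hst n hn
      by_cases hmem : n ∈ st.1
      · simpa [hmem] using hst
      · intro y hy
        simp only [hmem, reduceIte] at hy
        exact ih st.1 st.2 n S hS hst (hS t ht n hn) y hy

theorem dfsA_closed_fold (TC : List (String × List String)) (C : List String) (f : Nat)
    (ih : ∀ (vis : PySem.Set String) (acc : List String) (t : String),
        t ∈ C → t ∉ vis → cnt C vis < f → ClosedNew TC (dfsA TC f vis acc t).1 vis)
    (v0 : PySem.Set String) (hv0 : cnt C v0 < f) :
    ∀ (ns : List String), (∀ n ∈ ns, n ∈ C) →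
    ∀ (st : PySem.Set String × List String),
      (∀ x ∈ v0, x ∈ st.1) →
      (∀ x ∈ st.1, x ∉ v0 → ∀ n ∈ nb TC x, n ∈ st.1) →
      (∀ x ∈ st.1, x ∈ (ns.foldl (gA TC f) st).1) ∧
      (∀ n ∈ ns, n ∈ (ns.foldl (gA TC f) st).1) ∧
      (∀ x ∈ (ns.foldl (gA TC f) st).1, x ∉ v0 → ∀ n ∈ nb TC x, n ∈ (ns.foldl (gA TC f) st).1) := by
  intro ns
  induction ns with
  | nil =>
    intro _ st _ hclosed
    exact ⟨fun x hx => hx, by simp, hclosed⟩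
  | cons n ns ihns =>
    intro hnsC st hsub hclosed
    have hnC : n ∈ C := hnsC n (List.mem_cons_self)
    have hnsC' : ∀ m ∈ ns, m ∈ C := fun m hm => hnsC m (List.mem_cons_of_mem _ hm)
    simp only [List.foldl_cons]
    by_cases hmem : n ∈ st.1
    · have hgeq : gA TC f st n = st := by simp [gA, hmem]
      rw [hgeq]
      obtain ⟨ka, kb, kc⟩ := ihns hnsC' st hsub hclosed
      refine ⟨ka, ?_, kc⟩
      intro m hm
      rcases List.mem_cons.mp hm with rfl | hm
      · exact ka _ hmem
      · exact kb m hm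
    · have hgeq : gA TC f st n = dfsA TC f st.1 st.2 n := by simp [gA, hmem]
      rw [hgeq]
      have hmono : ∀ x ∈ st.1, x ∈ (dfsA TC f st.1 st.2 n).1 :=
        fun x hx => dfsA_mono TC f st.1 st.2 n x hx
      have hcnt1 : cnt C st.1 ≤ cnt C v0 := cnt_mono C v0 st.1 hsub
      have hcntf : cnt C st.1 < f := lt_of_le_of_lt hcnt1 hv0
      have hfpos : 0 < f := by
        have h1 : 0 < cnt C st.1 := by
          unfold cnt
          exact List.countP_pos_iff.mpr ⟨n, hnC, by simpa using hmem⟩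
        omega
      have hself : n ∈ (dfsA TC f st.1 st.2 n).1 := dfsA_mem_self TC f st.1 st.2 n hfpos
      have hnew : ClosedNew TC (dfsA TC f st.1 st.2 n).1 st.1 := ih st.1 st.2 n hnC hmem hcntf
      have hsub' : ∀ x ∈ v0, x ∈ (dfsA TC f st.1 st.2 n).1 := fun x hx => hmono x (hsub x hx)
      have hclosed' : ∀ x ∈ (dfsA TC f st.1 st.2 n).1, x ∉ v0 → ∀ m ∈ nb TC x, m ∈ (dfsA TC f st.1 st.2 n).1 := by
        intro x hx hxv m hm
        by_cases hxs : x ∈ st.1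
        · exact hmono m (hclosed x hxs hxv m hm)
        · exact hnew x hx hxs m hm
      obtain ⟨ka, kb, kc⟩ := ihns hnsC' (dfsA TC f st.1 st.2 n) hsub' hclosed'
      refine ⟨fun x hx => ka x (hmono x hx), ?_, kc⟩
      intro m hm
      rcases List.mem_cons.mp hm with rfl | hm
      · exact ka _ hself
      · exact kb m hm

theorem dfsA_closed (TC : List (String × List String)) (C : List String)
    (hC : ∀ n ∈ TC.flatMap (fun kv => kv.2), n ∈ C) :
    ∀ (f : Nat) (vis : PySem.Set String) (acc : List String) (t : String),
      t ∈ C → t ∉ vis → cnt C vis < f →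
      ClosedNew TC (dfsA TC f vis acc t).1 vis := by
  intro f
  induction f with
  | zero => intro vis acc t _ _ hcnt; exact absurd hcnt (Nat.not_lt_zero _)
  | succ f ih =>
    intro vis acc t htC htv hcnt
    have hunf : dfsA TC (f + 1) vis acc t
        = (nb TC t).foldl (gA TC f) (PySem.Set.add vis t, acc ++ [t]) := rfl
    intro x hx hxvis m hm
    rw [hunf] at hx ⊢
    have hv0cnt : cnt C (PySem.Set.add vis t) < f := by
      have h1 : cnt C (PySem.Set.add vis t) < cnt C vis :=
        cnt_strict C vis (PySem.Set.add vis t) t htC htv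
          (fun y hy => (PySem.Set.mem_add vis t y).mpr (Or.inl hy))
          ((PySem.Set.mem_add vis t t).mpr (Or.inr rfl))
      omega
    have hns : ∀ n ∈ nb TC t, n ∈ C := fun n hn => hC n (nb_subset TC t n hn)
    obtain ⟨_, kb, kc⟩ := dfsA_closed_fold TC C f ih (PySem.Set.add vis t) hv0cnt
      (nb TC t) hns (PySem.Set.add vis t, acc ++ [t]) (fun y hy => hy)
      (fun y hy hyv => absurd hy hyv)
    by_cases hxv0 : x ∈ PySem.Set.add vis t
    · have hxt : x = t := by
        rcases (PySem.Set.mem_add vis t x).mp hxv0 with h | h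
        · exact absurd h hxvis
        · exact h
      subst hxt
      exact kb m hm
    · exact kc x hx hxv0 m hm

-- the A-side set from an empty visited set, with its stated fuel
def aSet (TC : List (String × List String)) (i : String) : PySem.Set String :=
  (dfsA TC ((TC.flatMap (fun kv => kv.2)).length + 2) PySem.Set.empty [] i).1

theorem aSet_closed (TC : List (String × List String)) (i : String) :
    ClosedUnder TC (aSet TC i) := by
  have hnew := dfsA_closed TC (i :: TC.flatMap (fun kv => kv.2))
    (fun n hn => List.mem_cons_of_mem _ hn)
    ((TC.flatMap (fun kv => kv.2)).length + 2) PySem.Set.empty [] i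
    List.mem_cons_self
    (by simp [PySem.Set.empty])
    (by
      unfold cnt
      have hall : List.countP (fun y => decide (y ∉ (PySem.Set.empty : PySem.Set String)))
          (i :: TC.flatMap (fun kv => kv.2)) = (i :: TC.flatMap (fun kv => kv.2)).length := by
        rw [List.countP_eq_length]
        intro a _
        simp [PySem.Set.empty]
      rw [hall]
      simp)
  intro t ht n hn
  exact hnew t ht (by simp [PySem.Set.empty]) n hn

theorem aSet_mem_self (TC : List (String × List String)) (i : String) : i ∈ aSet TC i :=
  dfsA_mem_self TC _ PySem.Set.empty [] i (by omega)

-- ===== B-side: the stack loop computes the same least closed set =====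

-- all facts about one pass of B's neighbour fold, by induction on the neighbour list
theorem gB_fold (C : List String) :
    ∀ (ns : List String), (∀ n ∈ ns, n ∈ C) → ∀ (p : PySem.Set String × List String),
      (∀ x ∈ p.1, x ∈ (ns.foldl gB p).1) ∧
      (∀ x ∈ p.2, x ∈ (ns.foldl gB p).2) ∧
      (∀ n ∈ ns, n ∈ (ns.foldl gB p).1) ∧
      (∀ x ∈ (ns.foldl gB p).1, x ∈ p.1 ∨ x ∈ (ns.foldl gB p).2) ∧
      (∀ x ∈ (ns.foldl gB p).2, x ∈ p.2 ∨ x ∈ ns) ∧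
      (∀ x ∈ (ns.foldl gB p).1, x ∈ p.1 ∨ x ∈ ns) ∧
      ((∀ x ∈ p.2, x ∈ p.1) → ∀ x ∈ (ns.foldl gB p).2, x ∈ (ns.foldl gB p).1) ∧
      ((ns.foldl gB p).2.length + cnt C (ns.foldl gB p).1 ≤ p.2.length + cnt C p.1) := by
  intro ns
  induction ns with
  | nil =>
    intro _ p
    refine ⟨fun x hx => hx, fun x hx => hx, by simp, fun x hx => Or.inl hx,
      fun x hx => Or.inl hx, fun x hx => Or.inl hx, fun h => h, le_refl _⟩
  | cons n ns ihns =>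
    intro hnsC p
    have hnC : n ∈ C := hnsC n List.mem_cons_self
    have hnsC' : ∀ m ∈ ns, m ∈ C := fun m hm => hnsC m (List.mem_cons_of_mem _ hm)
    simp only [List.foldl_cons]
    by_cases hmem : n ∈ p.1
    · have hgeq : gB p n = p := by simp [gB, hmem]
      rw [hgeq]
      obtain ⟨k1, k2, k3, k4, k5, k6, k7, k8⟩ := ihns hnsC' p
      refine ⟨k1, k2, ?_, k4, ?_, ?_, k7, k8⟩
      · intro m hm
        rcases List.mem_cons.mp hm with rfl | hm
        · exact k1 _ hmem
        · exact k3 m hm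
      · intro x hx
        rcases k5 x hx with h | h
        · exact Or.inl h
        · exact Or.inr (List.mem_cons_of_mem _ h)
      · intro x hx
        rcases k6 x hx with h | h
        · exact Or.inl h
        · exact Or.inr (List.mem_cons_of_mem _ h)
    · have hgeq : gB p n = (PySem.Set.add p.1 n, n :: p.2) := by simp [gB, hmem]
      rw [hgeq]
      obtain ⟨k1, k2, k3, k4, k5, k6, k7, k8⟩ := ihns hnsC' (PySem.Set.add p.1 n, n :: p.2)
      have hmono1 : ∀ x ∈ p.1, x ∈ (PySem.Set.add p.1 n, n :: p.2).1 :=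
        fun x hx => (PySem.Set.mem_add p.1 n x).mpr (Or.inl hx)
      have hnin : n ∈ (PySem.Set.add p.1 n, n :: p.2).1 :=
        (PySem.Set.mem_add p.1 n n).mpr (Or.inr rfl)
      refine ⟨fun x hx => k1 x (hmono1 x hx),
        fun x hx => k2 x (List.mem_cons_of_mem _ hx), ?_, ?_, ?_, ?_, ?_, ?_⟩
      · intro m hm
        rcases List.mem_cons.mp hm with rfl | hm
        · exact k1 _ hnin
        · exact k3 m hm
      · intro x hx
        rcases k4 x hx with h | h
        · rcases (PySem.Set.mem_add p.1 n x).mp h with h | h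
          · exact Or.inl h
          · exact Or.inr (by rw [h]; exact k2 n List.mem_cons_self)
        · exact Or.inr h
      · intro x hx
        rcases k5 x hx with h | h
        · rcases List.mem_cons.mp h with rfl | h
          · exact Or.inr List.mem_cons_self
          · exact Or.inl h
        · exact Or.inr (List.mem_cons_of_mem _ h)
      · intro x hx
        rcases k6 x hx with h | h
        · rcases (PySem.Set.mem_add p.1 n x).mp h with h | rfl
          · exact Or.inl h
          · exact Or.inr List.mem_cons_self
        · exact Or.inr (List.mem_cons_of_mem _ h)
      · intro hps
        refine k7 ?_
        intro x hx
        rcases List.mem_cons.mp hx with rfl | hx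
        · exact hnin
        · exact hmono1 x (hps x hx)
      · have hdec : cnt C (PySem.Set.add p.1 n) < cnt C p.1 :=
          cnt_strict C p.1 (PySem.Set.add p.1 n) n hnC hmem
            (fun y hy => (PySem.Set.mem_add p.1 n y).mpr (Or.inl hy))
            ((PySem.Set.mem_add p.1 n n).mpr (Or.inr rfl))
        have := k8
        simp only [List.length_cons] at this ⊢
        omega

theorem dfsB_mono (TC : List (String × List String)) (C : List String)
    (hC : ∀ n ∈ TC.flatMap (fun kv => kv.2), n ∈ C) :
    ∀ (f : Nat) (vis : PySem.Set String) (acc stk : List String),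
      ∀ x ∈ vis, x ∈ (dfsB TC f vis acc stk).1 := by
  intro f
  induction f with
  | zero => intro vis acc stk x hx; simpa [dfsB] using hx
  | succ f ih =>
    intro vis acc stk x hx
    cases stk with
    | nil => simpa [dfsB] using hx
    | cons t rest =>
      simp only [dfsB]
      have hns : ∀ n ∈ nb TC t, n ∈ C := fun n hn => hC n (nb_subset TC t n hn)
      obtain ⟨k1, _⟩ := gB_fold C (nb TC t) hns (vis, rest)
      exact ih _ _ _ x (k1 x hx)

theorem dfsB_minimal (TC : List (String × List String)) (S : List String)
    (hS : ClosedUnder TC S) :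
    ∀ (f : Nat) (vis : PySem.Set String) (acc stk : List String),
      (∀ x ∈ vis, x ∈ S) → (∀ x ∈ stk, x ∈ S) →
      ∀ x ∈ (dfsB TC f vis acc stk).1, x ∈ S := by
  intro f
  induction f with
  | zero => intro vis acc stk hv _ x hx; exact hv x (by simpa [dfsB] using hx)
  | succ f ih =>
    intro vis acc stk hv hs
    cases stk with
    | nil => intro x hx; exact hv x (by simpa [dfsB] using hx)
    | cons t rest =>
      simp only [dfsB]
      have htS : t ∈ S := hs t List.mem_cons_self
      have hnbS : ∀ n ∈ nb TC t, n ∈ S := fun n hn => hS t htS n hn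
      obtain ⟨_, _, _, _, k5, k6, _, _⟩ := gB_fold S (nb TC t) hnbS (vis, rest)
      refine ih _ _ _ ?_ ?_
      · intro x hx
        rcases k6 x hx with h | h
        · exact hv x h
        · exact hnbS x h
      · intro x hx
        rcases k5 x hx with h | h
        · exact hs x (List.mem_cons_of_mem _ h)
        · exact hnbS x h

-- with enough fuel, the stack loop ends with an empty stack; its visited set is
-- TC-closed and agrees with the order list as a set
theorem dfsB_main (TC : List (String × List String)) (C : List String)
    (hC : ∀ n ∈ TC.flatMap (fun kv => kv.2), n ∈ C) :
    ∀ (f : Nat) (vis : PySem.Set String) (acc stk : List String),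
      (∀ x ∈ stk, x ∈ vis) →
      (∀ x ∈ acc, x ∈ vis) →
      (∀ x ∈ vis, x ∈ acc ∨ x ∈ stk) →
      (∀ x ∈ vis, x ∉ stk → ∀ n ∈ nb TC x, n ∈ vis) →
      stk.length + cnt C vis ≤ f →
      ClosedUnder TC (dfsB TC f vis acc stk).1 ∧
      (∀ x, x ∈ (dfsB TC f vis acc stk).1 ↔ x ∈ (dfsB TC f vis acc stk).2) := by
  intro f
  induction f with
  | zero =>
    intro vis acc stk hsv hacc hvo hinv hm
    have hstk : stk = [] := List.eq_nil_of_length_eq_zero (by omega)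
    subst hstk
    simp only [dfsB]
    constructor
    · intro t ht n hn
      exact hinv t ht (by simp) n hn
    · intro x
      constructor
      · intro hx
        rcases hvo x hx with h | h
        · exact h
        · cases h
      · exact hacc x
  | succ f ih =>
    intro vis acc stk hsv hacc hvo hinv hm
    cases stk with
    | nil =>
      simp only [dfsB]
      constructor
      · intro t ht n hn
        exact hinv t ht (by simp) n hn
      · intro x
        constructor
        · intro hx
          rcases hvo x hx with h | h
          · exact h
          · cases h
        · exact hacc x
    | cons t rest =>
      simp only [dfsB]
      have hns : ∀ n ∈ nb TC t, n ∈ C := fun n hn => hC n (nb_subset TC t n hn)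
      obtain ⟨k1, k2, k3, k4, _, _, k7, k8⟩ := gB_fold C (nb TC t) hns (vis, rest)
      have htvis : t ∈ vis := hsv t List.mem_cons_self
      refine ih _ _ _ ?_ ?_ ?_ ?_ ?_
      · exact k7 (fun x hx => hsv x (List.mem_cons_of_mem _ hx))
      · -- acc ++ [t] ⊆ new visited
        intro x hx
        rcases List.mem_append.mp hx with h | h
        · exact k1 x (hacc x h)
        · rcases List.mem_singleton.mp h with rfl
          exact k1 _ htvis
      · -- every visited element is recorded or still on the stack
        intro x hx
        rcases k4 x hx with hxvis | hxstk
        · rcases hvo x hxvis with h | h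
          · exact Or.inl (List.mem_append.mpr (Or.inl h))
          · rcases List.mem_cons.mp h with rfl | h
            · exact Or.inl (List.mem_append.mpr (Or.inr List.mem_cons_self))
            · exact Or.inr (k2 x h)
        · exact Or.inr hxstk
      · -- visited-but-not-on-stack elements are closed
        intro x hx hxs n hn
        rcases k4 x hx with hxvis | hxstk
        · by_cases hxt : x = t
          · subst hxt
            exact k3 n hn
          · by_cases hxr : x ∈ rest
            · exact absurd (k2 x hxr) hxs
            · have : x ∉ t :: rest := by
                intro h
                rcases List.mem_cons.mp h with h | h
                · exact hxt h
                · exact hxr h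
              exact k1 n (hinv x hxvis this n hn)
        · exact absurd hxstk hxs
      · have k8' : ((nb TC t).foldl gB (vis, rest)).2.length +
            cnt C ((nb TC t).foldl gB (vis, rest)).1 ≤ rest.length + cnt C vis := k8
        simp only [List.length_cons] at hm
        omega

-- membership agreement between the two traversals
theorem sets_agree (TC : List (String × List String)) (i : String) (x : String) :
    x ∈ aSet TC i ↔ x ∈ (bTrav TC i).2 := by
  have hCsub : ∀ n ∈ TC.flatMap (fun kv => kv.2), n ∈ i :: TC.flatMap (fun kv => kv.2) :=
    fun n hn => List.mem_cons_of_mem _ hn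
  have hi0 : i ∈ PySem.Set.ofList [i] := (PySem.Set.mem_ofList [i] i).mpr (by simp)
  have hmain := dfsB_main TC (i :: TC.flatMap (fun kv => kv.2)) hCsub
    ((TC.flatMap (fun kv => kv.2)).length + 2) (PySem.Set.ofList [i]) [] [i]
    (by
      intro z hz
      have hz' : z = i := List.mem_singleton.mp hz
      rw [hz']
      exact hi0)
    (by intro z hz; cases hz)
    (by
      intro z hz
      have hz' : z = i := List.mem_singleton.mp ((PySem.Set.mem_ofList [i] z).mp hz)
      rw [hz']
      exact Or.inr List.mem_cons_self)
    (by
      intro z hz hzs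
      exfalso
      exact hzs ((PySem.Set.mem_ofList [i] z).mp hz))
    (by
      have h1 : cnt (i :: TC.flatMap (fun kv => kv.2)) (PySem.Set.ofList [i])
          ≤ (TC.flatMap (fun kv => kv.2)).length := by
        unfold cnt
        rw [List.countP_cons]
        have e1 : decide (i ∉ (PySem.Set.ofList [i] : List String)) = false := by
          simp [hi0]
        rw [e1]
        simp only [Bool.false_eq_true, if_false, add_zero]
        exact List.countP_le_length
      simp only [List.length_singleton]
      omega)
  obtain ⟨hbClosed', hbSync⟩ := hmain
  have hbClosed : ClosedUnder TC ((bTrav TC i).1) := hbClosed'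
  have hbSync' : ∀ y, y ∈ (bTrav TC i).1 ↔ y ∈ (bTrav TC i).2 := hbSync
  have hbi : i ∈ (bTrav TC i).1 := dfsB_mono TC _ hCsub _ _ _ _ i hi0
  rw [← hbSync' x]
  constructor
  · intro hx
    exact dfsA_subset_closed TC _ PySem.Set.empty [] i ((bTrav TC i).1) hbClosed
      (by intro y hy; simp [PySem.Set.empty] at hy) hbi x hx
  · intro hx
    refine dfsB_minimal TC (aSet TC i) (aSet_closed TC i) _ _ _ _ ?_ ?_ x hx
    · intro y hy
      have hy' : y = i := List.mem_singleton.mp ((PySem.Set.mem_ofList [i] y).mp hy)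
      rw [hy']
      exact aSet_mem_self TC i
    · intro y hy
      have hy' : y = i := List.mem_singleton.mp hy
      rw [hy']
      exact aSet_mem_self TC i

theorem any_ext {p : String → Bool} (l1 l2 : List String) (h : ∀ x, x ∈ l1 ↔ x ∈ l2) :
    l1.any p = l2.any p := by
  have h1 : l1.any p = true ↔ l2.any p = true := by
    simp only [List.any_eq_true]
    constructor
    · rintro ⟨x, hx, hp⟩; exact ⟨x, (h x).mp hx, hp⟩
    · rintro ⟨x, hx, hp⟩; exact ⟨x, (h x).mpr hx, hp⟩
  exact Bool.eq_iff_iff.mpr h1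

theorem ctBreakLoop_eq (best_assign : List (String × List (String × Bool))) :
    ∀ (cs : List String) (f : Bool),
      ctBreakLoop best_assign cs f = if cs.any (fun c => asg best_assign c) then false else f := by
  intro cs
  induction cs with
  | nil => intro f; simp [ctBreakLoop]
  | cons c rest ih =>
    intro f
    simp only [ctBreakLoop, List.any_cons]
    by_cases h : asg best_assign c
    · simp [h]
    · simp [h, ih f]

theorem foldl_isfree (task_dict : List (String × List (String × List String)))
    (best_assign : List (String × List (String × Bool))) :
    ∀ (l : List String) (b : Bool),
      l.foldl (fun f r => ctBreakLoop best_assign (ctOf task_dict r) f) b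
        = (b && !(l.any (fun r => (ctOf task_dict r).any (fun c => asg best_assign c)))) := by
  intro l
  induction l with
  | nil => intro b; simp
  | cons r rest ih =>
    intro b
    rw [List.foldl_cons, ih, ctBreakLoop_eq, List.any_cons]
    cases hA : (ctOf task_dict r).any (fun c => asg best_assign c) <;> cases b <;> simp [hA]

theorem step_congr (task_dict : List (String × List (String × List String)))
    (best_assign : List (String × List (String × Bool))) (TC : List (String × List String))
    (free : List String) (i : String) :
    (let related_tasks := get_order_in_related_tasks TC i
     let is_free := related_tasks.foldl
       (fun f r => ctBreakLoop best_assign (ctOf task_dict r) f) true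
     if is_free then free ++ [i] else free)
    = (let order := (bTrav TC i).2
       if order.any (fun t => (ctOf task_dict t).any (fun c => asg best_assign c))
       then free else free ++ [i]) := by
  have hmemiff : ∀ x, x ∈ get_order_in_related_tasks TC i ↔ x ∈ (bTrav TC i).2 := by
    intro x
    unfold get_order_in_related_tasks
    rw [List.mem_reverse]
    rw [dfsA_sync TC ((TC.flatMap (fun kv => kv.2)).length + 2) PySem.Set.empty [] i
      (by intro y; simp [PySem.Set.empty]) x]
    exact sets_agree TC i x
  have hany := any_ext (p := fun r => (ctOf task_dict r).any (fun c => asg best_assign c))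
    (get_order_in_related_tasks TC i) ((bTrav TC i).2) hmemiff
  show (if (get_order_in_related_tasks TC i).foldl
      (fun f r => ctBreakLoop best_assign (ctOf task_dict r) f) true
    then free ++ [i] else free)
    = (if ((bTrav TC i).2).any (fun t => (ctOf task_dict t).any (fun c => asg best_assign c))
      then free else free ++ [i])
  rw [foldl_isfree, hany]
  rcases Bool.eq_false_or_eq_true
      (((bTrav TC i).2).any (fun t => (ctOf task_dict t).any (fun c => asg best_assign c)))
      with h | h <;> rw [h] <;> simp

-- ===== VERDICT (by name: the statement is the Claim_ definition above) =====
theorem get_available_task_spec : Claim_equal_get_available_task := by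
  intro task_dict arrived_tasks best_assign current_time TC delete_to_assign_task _hdom _hpre
  unfold Spec_get_available_task get_available_task get_available_task_alt
  refine PySem.List.foldl_congr_mem arrived_tasks _ _ [] ?_
  intro free i _
  exact step_congr task_dict best_assign TC free i
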